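-- pv_equiv track=rewrite | github.com/desplega-ai/chat-py | packages/chat-adapter-telegram/src/chat_adapter_telegram/markdown.py | _trim_to_markdown_v2_safe_boundary
-- ===== SOURCE A (Python) =====
-- _MARKDOWN_V2_ENTITY_MARKERS = ("*", "_", "~", "`")
--
-- def find_unescaped_positions(text: str, marker: str) -> list[int]:
--     """Return indices of every occurrence of ``marker`` in ``text`` that is
--     NOT preceded by an odd number of backslashes (i.e. not escaped).
--     """
--
--     positions: list[int] = []
--     for i, char in enumerate(text):
--         if char != marker:
--             continue
--         backslashes = 0
--         j = i - 1
--         while j >= 0 and text[j] == "\\":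
--             backslashes += 1
--             j -= 1
--         if backslashes % 2 == 0:
--             positions.append(i)
--     return positions
--
-- def ends_with_orphan_backslash(text: str) -> bool:
--     """Return ``True`` if ``text`` ends with an unpaired trailing backslash."""
--
--     trailing = 0
--     for i in range(len(text) - 1, -1, -1):
--         if text[i] != "\\":
--             break
--         trailing += 1
--     return trailing % 2 == 1
--
-- def _trim_to_markdown_v2_safe_boundary(text: str) -> str:
--     """Drop trailing characters that would produce invalid MarkdownV2 after
--     a length-based truncation: orphan trailing ``\\``, unclosed entity
--     delimiter (``*``, ``_``, ``~``, `` ` ``), or unmatched ``[``.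
--     """
--
--     current = text
--     max_iterations = len(current) + 1
--
--     for _ in range(max_iterations):
--         if ends_with_orphan_backslash(current):
--             current = current[:-1]
--             continue
--
--         min_unsafe_position = len(current)
--
--         for marker in _MARKDOWN_V2_ENTITY_MARKERS:
--             positions = find_unescaped_positions(current, marker)
--             if len(positions) % 2 == 1:
--                 last_unpaired = positions[-1] if positions else len(current)
--                 if last_unpaired < min_unsafe_position:
--                     min_unsafe_position = last_unpaired
--
--         open_brackets = find_unescaped_positions(current, "[")
--         close_brackets = find_unescaped_positions(current, "]")
--         if len(open_brackets) > len(close_brackets):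
--             last_open = open_brackets[-1] if open_brackets else len(current)
--             if last_open < min_unsafe_position:
--                 min_unsafe_position = last_open
--
--         if min_unsafe_position >= len(current):
--             return current
--
--         current = current[:min_unsafe_position]
--
--     return current
-- ===== SOURCE B (Python) =====
-- _MARKDOWN_V2_ENTITY_MARKERS = ("*", "_", "~", "`")
--
-- def _trim_to_markdown_v2_safe_boundary(text: str) -> str:
--     # Whether a character is escaped (odd run of backslashes before it) depends
--     # only on the text to its left, so it survives any truncation.  str.find
--     # jumps between occurrences of each special character at C speed, so the
--     # unescaped positions of all six specials are collected once; the
--     # truncation loop then runs on a running length, shrinking the sorted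
--     # position lists by popping from the back instead of rescanning the text.
--
--     def escaped_at(i):
--         j = i
--         while j > 0 and text[j - 1] == "\\":
--             j -= 1
--         return (i - j) % 2 == 1
--
--     def positions_of(m):
--         out = []
--         i = text.find(m)
--         while i != -1:
--             if not escaped_at(i):
--                 out.append(i)
--             i = text.find(m, i + 1)
--         return out
--
--     stars, unders, tildes, ticks, opens, closes = (
--         positions_of(m) for m in ("*", "_", "~", "`", "[", "]")
--     )
--
--     n = len(text)
--     while True:
--         if n > 0 and text[n - 1] == "\\" and not escaped_at(n - 1):
--             n -= 1
--             continue
--         for lst in (stars, unders, tildes, ticks, opens, closes):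
--             while lst and lst[-1] >= n:
--                 lst.pop()
--         cut = n
--         for lst in (stars, unders, tildes, ticks):
--             if len(lst) % 2 == 1 and lst[-1] < cut:
--                 cut = lst[-1]
--         if len(opens) > len(closes) and opens[-1] < cut:
--             cut = opens[-1]
--         if cut >= n:
--             return text[:n]
--         n = cut
-- ===== Notes on version B (the rewrite author's own statement) =====
-- stated objective: faster
-- what changed: Instead of rescanning the whole string for every marker on every truncation iteration (with a quadratic backslash re-count), B collects the unescaped positions of the six special characters once (str.find jumps between occurrences; backslash runs are scanned once each) and then simulates the truncation loop on a running length, shrinking the sorted position lists by popping from the back.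
import Mathlib
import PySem

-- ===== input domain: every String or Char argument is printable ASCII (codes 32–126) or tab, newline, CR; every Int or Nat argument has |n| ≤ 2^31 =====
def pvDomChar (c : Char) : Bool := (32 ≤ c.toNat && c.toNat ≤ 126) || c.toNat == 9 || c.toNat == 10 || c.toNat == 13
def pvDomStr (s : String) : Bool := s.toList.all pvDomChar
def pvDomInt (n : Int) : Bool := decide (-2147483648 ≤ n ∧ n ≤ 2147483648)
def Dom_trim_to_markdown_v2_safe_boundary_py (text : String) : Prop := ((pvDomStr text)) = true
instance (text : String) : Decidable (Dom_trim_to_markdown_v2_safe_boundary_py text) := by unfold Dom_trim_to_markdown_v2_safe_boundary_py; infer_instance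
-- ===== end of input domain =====

-- B replaces A's per-iteration full rescans by once-precomputed escape flags and
-- per-marker position lists that are only popped from the back; proved equal on all inputs.

-- ===== PORT A =====

-- the inner `while j >= 0 and text[j] == "\\"` backslash-counting loop of
-- find_unescaped_positions (and the descending loop of ends_with_orphan_backslash,
-- which counts exactly the same run ending at the last index): number of
-- consecutive backslashes ending at index j, scanning leftwards.
def countBS (text : List Char) (j : Int) : Nat :=
  if h : 0 ≤ j ∧ text[j.toNat]? = some '\\' then countBS text (j - 1) + 1 else 0
termination_by (j + 1).toNat
decreasing_by omega

def findUnescapedPositions (text : List Char) (marker : Char) : List Int :=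
  (PySem.List.enumerate text).foldl
    (fun positions p =>
      if p.2 != marker then positions
      else
        let backslashes := countBS text (p.1 - 1)
        if backslashes % 2 == 0 then positions ++ [p.1] else positions)
    []

def endsWithOrphanBackslash (text : List Char) : Bool :=
  -- the Python loop computes the trailing run of backslashes = countBS at the last index
  countBS text ((text.length : Int) - 1) % 2 == 1

def pvMarkersA : List Char := ['*', '_', '~', '`']

-- the `for _ in range(max_iterations)` loop, fuel = max_iterations
def trimA (fuel : Nat) (current : List Char) : List Char :=
  match fuel with
  | 0 => current
  | fuel + 1 =>
    if endsWithOrphanBackslash current then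
      trimA fuel current.dropLast               -- current[:-1]
    else
      let minUnsafe : Int := pvMarkersA.foldl (fun minPos marker =>
        let positions := findUnescapedPositions current marker
        if positions.length % 2 == 1 then
          let lastUnpaired := positions.getLastD (current.length : Int)  -- positions[-1] if positions else len(current)
          if lastUnpaired < minPos then lastUnpaired else minPos
        else minPos) (current.length : Int)
      let openBrackets := findUnescapedPositions current '['
      let closeBrackets := findUnescapedPositions current ']'
      let minUnsafe2 : Int :=
        if closeBrackets.length < openBrackets.length then
          let lastOpen := openBrackets.getLastD (current.length : Int)
          if lastOpen < minUnsafe then lastOpen else minUnsafe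
        else minUnsafe
      if (current.length : Int) ≤ minUnsafe2 then current
      else trimA fuel (current.take minUnsafe2.toNat)   -- current[:min]; min is a nonnegative in-range index here

def trim_to_markdown_v2_safe_boundary_py (text : String) : String :=
  String.mk (trimA (text.toList.length + 1) text.toList)

-- ===== PORT B =====

-- escaped_at(i): walk left over the backslash run, parity of its length
def runStart (text : List Char) (j : Nat) : Nat :=
  if h : 0 < j ∧ text[j - 1]? = some '\\' then runStart text (j - 1) else j
termination_by j
decreasing_by omega

def escapedAt (text : List Char) (i : Nat) : Bool :=
  (i - runStart text i) % 2 == 1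

-- positions_of(m): `i = text.find(m); while i != -1: ...; i = text.find(m, i+1)`;
-- fuel only makes the loop total (there are at most len(text) occurrences)
def posLoop (text : List Char) (m : Char) : Nat → Int → List Int → List Int
  | 0, _, out => out
  | fuel + 1, i, out =>
    if i != -1 then
      let out' := if !escapedAt text i.toNat then out ++ [i] else out
      posLoop text m fuel (PySem.Chars.findFrom text [m] (i + 1) none) out'
    else out

def positionsOf (text : List Char) (m : Char) : List Int :=
  posLoop text m (text.length + 1) (PySem.Chars.find text [m]) []

-- `while lst and lst[-1] >= n: lst.pop()`
def dropGE (n : Int) (l : List Int) : List Int :=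
  if h : l ≠ [] ∧ n ≤ l.getLastD 0 then dropGE n l.dropLast else l
termination_by l.length
decreasing_by have := List.length_pos_iff.mpr h.1; simp [List.length_dropLast]; omega

-- the `while True` loop; fuel only makes it total (the loop returns within n+1 iterations)
def trimB (cs : List Char) :
    Nat → Nat → List Int → List Int → List Int → List Int → List Int → List Int → List Char
  | 0, n, _, _, _, _, _, _ => cs.take n
  | fuel + 1, n, stars, unders, tildes, ticks, opens, closes =>
    if n > 0 && (cs.getD (n - 1) ' ' == '\\') && !escapedAt cs (n - 1) then
      trimB cs fuel (n - 1) stars unders tildes ticks opens closes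
    else
      let stars := dropGE (n : Int) stars
      let unders := dropGE (n : Int) unders
      let tildes := dropGE (n : Int) tildes
      let ticks := dropGE (n : Int) ticks
      let opens := dropGE (n : Int) opens
      let closes := dropGE (n : Int) closes
      let cut : Int := [stars, unders, tildes, ticks].foldl
        (fun cut l => if l.length % 2 == 1 && l.getLastD 0 < cut then l.getLastD 0 else cut) (n : Int)
      let cut : Int :=
        if closes.length < opens.length && opens.getLastD 0 < cut then opens.getLastD 0 else cut
      if (n : Int) ≤ cut then cs.take n        -- text[:n]
      else trimB cs fuel cut.toNat stars unders tildes ticks opens closes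

def trim_to_markdown_v2_safe_boundary_py_alt (text : String) : String :=
  let cs := text.toList
  String.mk (trimB cs (cs.length + 1) cs.length
    (positionsOf cs '*') (positionsOf cs '_') (positionsOf cs '~') (positionsOf cs '`')
    (positionsOf cs '[') (positionsOf cs ']'))

-- ===== PRECONDITION & SPEC =====
def Spec_trim_to_markdown_v2_safe_boundary_py (text : String) (out : String) : Prop := out = trim_to_markdown_v2_safe_boundary_py_alt text
instance (text : String) (out : String) : Decidable (Spec_trim_to_markdown_v2_safe_boundary_py text out) := by unfold Spec_trim_to_markdown_v2_safe_boundary_py; infer_instance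

-- ===== CLAIM (what is proved, stated in full; the proofs are below) =====
def Claim_equal_trim_to_markdown_v2_safe_boundary_py : Prop := ∀ (text : String), Dom_trim_to_markdown_v2_safe_boundary_py text → Spec_trim_to_markdown_v2_safe_boundary_py text (trim_to_markdown_v2_safe_boundary_py text)

-- ===== LEMMAS AND PROOFS =====

-- canonical description: indices < n of unescaped occurrences of m in cs
def upos (cs : List Char) (m : Char) (n : Nat) : List Int :=
  ((PySem.List.enumerate cs).filter
    (fun p => p.2 == m && (countBS cs (p.1 - 1) % 2 == 0) && decide (p.1 < (n : Int)))).map (·.1)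

theorem countBS_neg (cs : List Char) (j : Int) (h : j < 0) : countBS cs j = 0 := by
  rw [countBS]; simp [show ¬ (0 ≤ j) by omega]

theorem countBS_take (cs : List Char) (n : Nat) : ∀ (j : Int), j < (n : Int) →
    countBS (cs.take n) j = countBS cs j := by
  have main : ∀ (k : Nat) (j : Int), (j + 1).toNat = k → j < (n : Int) →
      countBS (cs.take n) j = countBS cs j := by
    intro k
    induction k using Nat.strong_induction_on with
    | _ k ih =>
      intro j hk hj
      by_cases h0 : 0 ≤ j
      · have hidx : (cs.take n)[j.toNat]? = cs[j.toNat]? := by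
          rw [List.getElem?_take]
          simp [show j.toNat < n by omega]
        conv_lhs => rw [countBS]
        conv_rhs => rw [countBS]
        rw [hidx]
        by_cases hc : 0 ≤ j ∧ cs[j.toNat]? = some '\\'
        · rw [dif_pos hc, dif_pos hc, ih j.toNat (by omega) (j - 1) (by omega) (by omega)]
        · rw [dif_neg hc, dif_neg hc]
      · rw [countBS_neg _ _ (by omega), countBS_neg _ _ (by omega)]
  intro j hj; exact main _ j rfl hj

theorem getLastD_congr {α : Type} (l : List α) (h : l ≠ []) (d₁ d₂ : α) :
    l.getLastD d₁ = l.getLastD d₂ := by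
  rw [List.getLastD_eq_getLast?, List.getLastD_eq_getLast?]
  obtain ⟨a, ha⟩ := List.getLast?_isSome.mpr h |> Option.isSome_iff_exists.mp
  simp [ha]

theorem enumerate_take {α : Type} (l : List α) : ∀ (n : Nat) (s : Int),
    PySem.List.enumerate (l.take n) s = (PySem.List.enumerate l s).take n := by
  induction l with
  | nil => simp [PySem.List.enumerate_nil]
  | cons x xs ih =>
    intro n s
    cases n with
    | zero => simp [PySem.List.enumerate_nil]
    | succ n => simp [PySem.List.enumerate_cons, ih]

theorem fst_ge_of_mem_enumerate {α : Type} (l : List α) (s : Int) (p : Int × α)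
    (hp : p ∈ PySem.List.enumerate l s) : s ≤ p.1 := by
  obtain ⟨k, hk, rfl⟩ := (PySem.List.mem_enumerate_iff _ _ _).mp hp
  simp

theorem take_enumerate_filter {α : Type} (l : List α) : ∀ (n : Nat) (s : Int),
    (PySem.List.enumerate l s).take n
      = (PySem.List.enumerate l s).filter (fun p => decide (p.1 < s + n)) := by
  induction l with
  | nil => simp [PySem.List.enumerate_nil]
  | cons x xs ih =>
    intro n s
    cases n with
    | zero =>
      simp only [List.take_zero, PySem.List.enumerate_cons]
      rw [List.filter_cons]
      simp only [Nat.cast_zero, add_zero, lt_irrefl, decide_false, Bool.false_eq_true, if_false]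
      symm; rw [List.filter_eq_nil_iff]
      intro p hp
      have := fst_ge_of_mem_enumerate _ _ _ hp
      simp; omega
    | succ n =>
      simp only [PySem.List.enumerate_cons, List.take_succ_cons]
      rw [List.filter_cons]
      simp only [show s < s + ((n:Nat)+1:Nat) by push_cast; omega, decide_true]
      rw [ih n (s+1)]
      congr 1
      apply List.filter_congr
      intro p hp
      simp; constructor <;> intro <;> omega

theorem findPos_eq_filter (text : List Char) (m : Char) :
    findUnescapedPositions text m
      = ((PySem.List.enumerate text).filter
          (fun p => p.2 == m && (countBS text (p.1 - 1) % 2 == 0))).map (·.1) := by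
  unfold findUnescapedPositions
  rw [PySem.List.foldl_congr_mem
    (g := fun acc p => if p.2 == m && (countBS text (p.1 - 1) % 2 == 0) then acc ++ [p.1] else acc)]
  · rw [PySem.List.foldl_append_if]; simp
  · intro acc p _
    by_cases h1 : p.2 = m
    · by_cases h2 : countBS text (p.1 - 1) % 2 = 0 <;> simp [h1, h2]
    · simp [h1]

theorem findPos_take (cs : List Char) (m : Char) (n : Nat) :
    findUnescapedPositions (cs.take n) m = upos cs m n := by
  rw [findPos_eq_filter, enumerate_take, take_enumerate_filter, List.filter_filter]
  unfold upos
  rw [List.filter_congr (q := fun p => p.2 == m && (countBS cs (p.1 - 1) % 2 == 0) && decide (p.1 < (n : Int)))]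
  intro p _
  by_cases hlt : p.1 < (n : Int)
  · rw [countBS_take cs n (p.1 - 1) (by omega)]
    simp [hlt]
  · simp [hlt]

theorem upos_sorted (cs : List Char) (m : Char) (n : Nat) :
    (upos cs m n).Pairwise (· < ·) := by
  unfold upos
  rw [List.pairwise_map]
  exact ((PySem.List.pairwise_lt_enumerate cs 0).sublist List.filter_sublist).imp (fun h => h)

theorem upos_nonneg (cs : List Char) (m : Char) (n : Nat) :
    ∀ x ∈ upos cs m n, 0 ≤ x ∧ x < (n : Int) := by
  unfold upos
  intro x hx
  rw [List.mem_map] at hx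
  obtain ⟨p, hp, rfl⟩ := hx
  rw [List.mem_filter] at hp
  constructor
  · have := fst_ge_of_mem_enumerate _ _ _ hp.1; omega
  · have := hp.2
    simp only [Bool.and_eq_true, decide_eq_true_eq] at this
    exact this.2

theorem dropGE_sorted (n : Int) (l : List Int) (h : l.Pairwise (· < ·)) :
    dropGE n l = l.filter (fun x => decide (x < n)) := by
  induction l using List.reverseRecOn with
  | nil => rw [dropGE]; simp
  | append_singleton l a ih =>
    have hlast : (l ++ [a]).getLastD 0 = a := by simp
    have hpl : l.Pairwise (· < ·) := h.sublist (List.sublist_append_left _ _)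
    have hmem : ∀ x ∈ l, x < a := by
      intro x hx
      have := List.pairwise_append.mp h
      exact this.2.2 x hx a (by simp)
    rw [dropGE]
    by_cases hc : n ≤ a
    · rw [dif_pos ⟨by simp, by rw [hlast]; exact hc⟩]
      rw [List.dropLast_concat, ih hpl, List.filter_append]
      simp [show ¬ (a < n) by omega]
    · rw [dif_neg (by rw [hlast]; simp; omega)]
      rw [List.filter_append, eq_comm]
      simp only [List.filter_cons, List.filter_nil]
      rw [List.filter_eq_self.mpr (fun x hx => by simpa using lt_trans (hmem x hx) (by omega))]
      simp [show a < n by omega]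

theorem dropGE_upos (cs : List Char) (m : Char) (n b : Nat) (hb : n ≤ b) :
    dropGE (n : Int) (upos cs m b) = upos cs m n := by
  rw [dropGE_sorted _ _ (upos_sorted cs m b)]
  unfold upos
  rw [List.filter_map, List.filter_filter]
  congr 1
  apply List.filter_congr
  intro p _
  by_cases hlt : p.1 < (n : Int)
  · simp [show p.1 < (b : Int) by omega, hlt]
  · simp [hlt]

theorem stepEq (L : List Int) (c d : Int) :
    (if L.length % 2 == 1 then (if L.getLastD d < c then L.getLastD d else c) else c)
      = (if L.length % 2 == 1 && L.getLastD 0 < c then L.getLastD 0 else c) := by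
  by_cases hodd : L.length % 2 == 1
  · have hne : L ≠ [] := by
      intro h; subst h; simp at hodd
    rw [getLastD_congr L hne d 0]
    simp only [hodd, Bool.true_and, if_true]
    by_cases h : L.getLastD 0 < c <;> simp [h]
  · simp only [hodd, Bool.false_and, if_false, Bool.false_eq_true]

theorem brEq (O C : List Int) (c d : Int) :
    (if C.length < O.length then (if O.getLastD d < c then O.getLastD d else c) else c)
      = (if decide (C.length < O.length) && O.getLastD 0 < c then O.getLastD 0 else c) := by
  by_cases hlt : C.length < O.length
  · have hne : O ≠ [] := by
      intro h; subst h; simp at hlt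
    rw [getLastD_congr O hne d 0]
    simp only [hlt, decide_true, Bool.true_and, if_true]
    by_cases h : O.getLastD 0 < c <;> simp [h]
  · simp only [hlt, decide_false, Bool.false_and, if_false, Bool.false_eq_true]

theorem getLastD_nonneg (L : List Int) (h : ∀ x ∈ L, 0 ≤ x) : 0 ≤ L.getLastD 0 := by
  rcases (eq_or_ne L []) with rfl | hne
  · simp
  · rcases hx : L.getLast? with _ | a
    · simp [List.getLastD_eq_getLast?, hx]
    · rw [List.getLastD_eq_getLast?, hx]
      exact h a (List.mem_of_getLast? hx)

theorem foldl_stepB_nonneg (LS : List (List Int)) : ∀ (c : Int), 0 ≤ c →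
    (∀ L ∈ LS, 0 ≤ L.getLastD 0) →
    0 ≤ LS.foldl (fun cut l => if l.length % 2 == 1 && l.getLastD 0 < cut then l.getLastD 0 else cut) c := by
  induction LS with
  | nil => intro c hc _; simpa using hc
  | cons L LS ih =>
    intro c hc h
    simp only [List.foldl_cons]
    apply ih
    · split
      · exact h L (by simp)
      · exact hc
    · intro x hx; exact h x (by simp [hx])

theorem runStart_le (cs : List Char) : ∀ (j : Nat), runStart cs j ≤ j := by
  intro j
  induction j using Nat.strong_induction_on with
  | _ j ih =>
    rw [runStart]
    split
    · rename_i h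
      exact le_trans (ih (j - 1) (by omega)) (by omega)
    · exact le_rfl


theorem runStart_sub (cs : List Char) : ∀ (i : Nat),
    (i - runStart cs i : Nat) = countBS cs ((i : Int) - 1) := by
  intro i
  induction i using Nat.strong_induction_on with
  | _ i ih =>
    rw [runStart, countBS]
    by_cases hc : 0 < i ∧ cs[i - 1]? = some '\\'
    · have hcast : ((i : Int) - 1).toNat = i - 1 := by omega
      rw [dif_pos hc, dif_pos (by rw [hcast]; exact ⟨by omega, hc.2⟩)]
      have h1 : ((i - 1 : Nat) : Int) - 1 = (i : Int) - 1 - 1 := by omega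
      rw [← h1, ← ih (i - 1) (by omega)]
      have := runStart_le cs (i - 1)
      omega
    · rw [dif_neg hc, dif_neg]
      · omega
      · intro h
        have hcast : ((i : Int) - 1).toNat = i - 1 := by omega
        rcases h with ⟨h0, hg⟩
        rw [hcast] at hg
        exact hc ⟨by omega, hg⟩


theorem escapedAt_eq (cs : List Char) (i : Nat) :
    escapedAt cs i = decide (countBS cs ((i : Int) - 1) % 2 = 1) := by
  unfold escapedAt
  rw [runStart_sub]
  by_cases h : countBS cs ((i : Int) - 1) % 2 = 1 <;> simp [h]


def uposFrom (cs : List Char) (m : Char) (k : Nat) : List Int :=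
  ((PySem.List.enumerate cs).filter
    (fun p => p.2 == m && (countBS cs (p.1 - 1) % 2 == 0) && decide ((k : Int) ≤ p.1))).map (·.1)


theorem singleton_prefix {m : Char} {l : List Char} : [m] <+: l ↔ l.head? = some m := by
  cases l <;> simp [List.cons_prefix_cons, eq_comm]


theorem uposFrom_zero (cs : List Char) (m : Char) : uposFrom cs m 0 = upos cs m cs.length := by
  unfold uposFrom upos
  congr 1
  apply List.filter_congr
  intro p hp
  obtain ⟨k, hk, rfl⟩ := (PySem.List.mem_enumerate_iff _ _ _).mp hp
  have h2 : (0 : Int) + (k : Int) < (cs.length : Int) := by omega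
  simp [h2, hk]


theorem enum_filter_fst (cs : List Char) : ∀ (s : Int) (rn : Nat) (q : Int × Char → Bool)
    (hr : rn < cs.length), (∀ p, q p = true → p.1 = s + rn) →
    (PySem.List.enumerate cs s).filter q
      = (if q (s + rn, cs[rn]'hr) then [(s + rn, cs[rn]'hr)] else []) := by
  induction cs with
  | nil => intro s rn q hr hq; simp at hr
  | cons x t ih =>
    intro s rn q hr hq
    rw [PySem.List.enumerate_cons, List.filter_cons]
    cases rn with
    | zero =>
      have htail : (PySem.List.enumerate t (s + 1)).filter q = [] := by
        rw [List.filter_eq_nil_iff]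
        intro p hp hqp
        have h1 := fst_ge_of_mem_enumerate _ _ _ hp
        have h2 := hq p hqp
        simp at h2
        omega
      simp [htail]
    | succ rn =>
      have hhead : q (s, x) = false := by
        cases hqx : q (s, x)
        · rfl
        · have := hq _ hqx
          simp at this
          omega
      rw [hhead]
      simp only [Bool.false_eq_true, if_false, List.getElem_cons_succ]
      rw [ih (s + 1) rn q (by simpa using hr) (by intro p hp; rw [hq p hp]; push_cast; ring)]
      have : s + 1 + (rn : Int) = s + ((rn : Nat) + 1 : Nat) := by push_cast; ring
      rw [this]


theorem filter_or_sorted (l : List (Int × Char)) (q1 q2 : Int × Char → Bool) (r : Int)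
    (hl : l.Pairwise (fun p q => p.1 < q.1))
    (h1 : ∀ p, q1 p = true → p.1 ≤ r) (h2 : ∀ p, q2 p = true → r < p.1) :
    l.filter (fun p => q1 p || q2 p) = l.filter q1 ++ l.filter q2 := by
  induction l with
  | nil => simp
  | cons x t ih =>
    have hx := List.pairwise_cons.mp hl
    simp only [List.filter_cons]
    cases hq1x : q1 x with
    | true =>
      have hq2x : q2 x = false := by
        cases hq2x' : q2 x
        · rfl
        · have := h1 x hq1x
          have := h2 x hq2x'
          omega
      simp [hq1x, hq2x, ih hx.2]
    | false =>
      cases hq2x : q2 x with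
      | false => simp [hq1x, hq2x, ih hx.2]
      | true =>
        have hrx := h2 x hq2x
        have ht1 : t.filter q1 = [] := by
          rw [List.filter_eq_nil_iff]
          intro p hp hqp
          have := h1 p hqp
          have := hx.1 p hp
          omega
        have ht2 : t.filter (fun p => q1 p || q2 p) = t.filter q2 := by
          apply List.filter_congr
          intro p hp
          cases hq1p : q1 p with
          | false => simp
          | true =>
            have := h1 p hq1p
            have := hx.1 p hp
            omega
        simp [hq1x, hq2x, ht1, ht2]


theorem posLoop_spec (cs : List Char) (m : Char) : ∀ (fuel k : Nat) (out : List Int),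
    k ≤ cs.length → cs.length - k < fuel →
    posLoop cs m fuel (PySem.Chars.findFrom cs [m] (k : Int) none) out = out ++ uposFrom cs m k := by
  intro fuel
  induction fuel with
  | zero => intro k out _ hf; omega
  | succ fuel ih =>
    intro k out hk hf
    by_cases hr : PySem.Chars.findFrom cs [m] (k : Int) none = -1
    · rw [posLoop, if_neg (by simp [hr])]
      have hnoin : ¬ [m] <:+: cs.drop k :=
        (PySem.Chars.findFrom_natCast_eq_neg_one_iff cs [m] k hk).mp hr
      rw [List.singleton_infix_iff] at hnoin
      have : uposFrom cs m k = [] := by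
        unfold uposFrom
        rw [List.filter_eq_nil_iff.mpr, List.map_nil]
        intro p hp hqp
        obtain ⟨j, hj, rfl⟩ := (PySem.List.mem_enumerate_iff _ _ _).mp hp
        simp only [zero_add, Bool.and_eq_true, beq_iff_eq, decide_eq_true_eq] at hqp
        apply hnoin
        have hjk : k ≤ j := by omega
        have : cs[j] ∈ cs.drop k := by
          rw [List.mem_iff_getElem]
          exact ⟨j - k, by rw [List.length_drop]; omega, by rw [List.getElem_drop]; congr 1; omega⟩
        rw [hqp.1.1] at this
        exact this
      rw [this, List.append_nil]
    · obtain ⟨hge, hpre, hmin⟩ := PySem.Chars.findFrom_natCast_spec cs [m] k hk hr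
      set r := PySem.Chars.findFrom cs [m] (k : Int) none with hrdef
      clear_value r
      have hr0 : 0 ≤ r := le_trans (by omega) hge
      obtain ⟨R, rfl⟩ : ∃ R : Nat, r = (R : Int) := ⟨r.toNat, by omega⟩
      simp only [Int.toNat_natCast] at hpre hmin
      have hgeN : k ≤ R := by omega
      have hget : cs[R]? = some m := by
        rw [← List.head?_drop]
        exact singleton_prefix.mp hpre
      have hrlen : R < cs.length := by
        by_contra hcon
        rw [List.getElem?_eq_none (by omega)] at hget
        simp at hget
      have hgetE : cs[R] = m := by
        rw [List.getElem?_eq_getElem hrlen] at hget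
        exact Option.some.inj hget
      have hcore : uposFrom cs m k
          = (if countBS cs ((R : Int) - 1) % 2 == 0 then [(R : Int)] else [])
            ++ uposFrom cs m (R + 1) := by
        unfold uposFrom
        rw [List.filter_congr (q := fun p =>
              (p.2 == m && (countBS cs (p.1 - 1) % 2 == 0) && (p.1 == (R : Int)))
              || (p.2 == m && (countBS cs (p.1 - 1) % 2 == 0) && decide (((R + 1 : Nat) : Int) ≤ p.1)))]
        · rw [filter_or_sorted (PySem.List.enumerate cs) _ _ (R : Int)
                (PySem.List.pairwise_lt_enumerate cs 0)
                (by intro p hp; simp only [Bool.and_eq_true, beq_iff_eq] at hp; omega)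
                (by intro p hp; simp only [Bool.and_eq_true, decide_eq_true_eq] at hp; omega)]
          rw [List.map_append]
          congr 1
          rw [enum_filter_fst cs 0 R _ hrlen
              (by intro p hp; simp only [Bool.and_eq_true, beq_iff_eq] at hp; rw [hp.2]; omega)]
          by_cases hesc : countBS cs ((R : Int) - 1) % 2 = 0
          · rw [if_pos (by simp [hgetE, hesc]), if_pos (by exact beq_iff_eq.mpr hesc)]
            simp
          · rw [if_neg (by simp [hgetE, hesc]), if_neg (by simp [hesc])]
            simp
        · intro p hp
          obtain ⟨j, hj, rfl⟩ := (PySem.List.mem_enumerate_iff _ _ _).mp hp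
          simp only [zero_add]
          by_cases hA : cs[j] = m
          · by_cases hB : countBS cs ((j : Int) - 1) % 2 = 0
            · have hiff : ((k : Int) ≤ (j : Int)) ↔
                  ((j : Int) = (R : Int) ∨ ((R + 1 : Nat) : Int) ≤ (j : Int)) := by
                constructor
                · intro hkj
                  by_cases hjr : j < R
                  · exfalso
                    apply hmin j (by omega) hjr
                    rw [singleton_prefix, List.head?_drop, List.getElem?_eq_getElem hj, hA]
                  · by_cases hje : j = R
                    · left; omega
                    · right; push_cast; omega
                · intro h
                  rcases h with h | h <;> omega
              have hEq : (decide ((k : Int) ≤ (j : Int)))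
                  = (((j : Int) == (R : Int)) || decide (((R + 1 : Nat) : Int) ≤ (j : Int))) := by
                by_cases hkj : (k : Int) ≤ (j : Int)
                · rcases hiff.mp hkj with h | h
                  · simp [hkj, h] <;> omega
                  · simp [hkj, h] <;> omega
                · have h1 : ¬ ((j : Int) = (R : Int) ∨ ((R + 1 : Nat) : Int) ≤ (j : Int)) :=
                    fun h => hkj (hiff.mpr h)
                  rw [not_or] at h1
                  simp [hkj, h1.1, h1.2] <;> omega
              rw [hEq, Bool.and_or_distrib_left]
            · have hB' : (countBS cs ((j : Int) - 1) % 2 == 0) = false := by simpa using hB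
              rw [hB']
              simp
          · have hA' : (cs[j] == m) = false := by simpa using hA
            rw [hA']
            simp
      rw [posLoop, if_pos (by simp [hr]), hcore]
      have hcast : (R : Int) + 1 = ((R + 1 : Nat) : Int) := by omega
      simp only [hcast]
      rw [ih (R + 1) _ (by omega) (by omega)]
      simp only [Int.toNat_natCast]
      by_cases hesc : countBS cs ((R : Int) - 1) % 2 = 0
      · have hE : escapedAt cs R = false := by
          rw [escapedAt_eq, decide_eq_false_iff_not]
          omega
        simp only [hE, Bool.not_false, if_true]
        rw [if_pos (by exact beq_iff_eq.mpr hesc)]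
        simp
      · have hE : escapedAt cs R = true := by
          rw [escapedAt_eq, decide_eq_true_eq]
          omega
        simp only [hE, Bool.not_true, Bool.false_eq_true, if_false]
        rw [if_neg (by simp [hesc])]
        simp

theorem positionsOf_eq (cs : List Char) (m : Char) :
    positionsOf cs m = upos cs m cs.length := by
  unfold positionsOf
  rw [← PySem.Chars.findFrom_zero, show (0 : Int) = ((0 : Nat) : Int) from rfl,
      posLoop_spec cs m (cs.length + 1) 0 [] (by omega) (by omega)]
  simpa using uposFrom_zero cs m

theorem hbr_nonneg (O C : List Int) (c : Int) (hO : ∀ x ∈ O, 0 ≤ x) (hc : 0 ≤ c) :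
    0 ≤ (if decide (C.length < O.length) && O.getLastD 0 < c then O.getLastD 0 else c) := by
  split
  · exact getLastD_nonneg O hO
  · exact hc

theorem orphan_take (cs : List Char) (n : Nat) (hn : n ≤ cs.length) :
    endsWithOrphanBackslash (cs.take n)
      = (decide (n > 0) && (cs.getD (n - 1) ' ' == '\\') && !escapedAt cs (n - 1)) := by
  unfold endsWithOrphanBackslash
  rw [List.length_take_of_le hn]
  cases n with
  | zero => simp [countBS_neg]
  | succ k =>
    have hk : k < cs.length := by omega
    have h1 : ((k + 1 : Nat) : Int) - 1 = (k : Int) := by push_cast; omega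
    rw [h1, countBS_take cs (k+1) (k : Int) (by omega), countBS]
    simp only [Nat.add_sub_cancel]
    rw [List.getD_eq_getElem?_getD, List.getElem?_eq_getElem hk, escapedAt_eq cs k]
    by_cases hcs : cs[k] = '\\'
    · rw [dif_pos ⟨Int.natCast_nonneg _, by rw [Int.toNat_natCast, List.getElem?_eq_getElem hk, hcs]⟩]
      by_cases h2 : countBS cs ((k : Int) - 1) % 2 = 1 <;> simp [hcs, h2] <;> omega
    · rw [dif_neg (by rw [Int.toNat_natCast, List.getElem?_eq_getElem hk]; simp [hcs])]
      simp [hcs]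


theorem trim_main (cs : List Char) : ∀ (fuel n bs bu bt bk bo bc : Nat),
    n ≤ cs.length → n < fuel → n ≤ bs → n ≤ bu → n ≤ bt → n ≤ bk → n ≤ bo → n ≤ bc →
    trimA fuel (cs.take n)
      = trimB cs fuel n (upos cs '*' bs) (upos cs '_' bu) (upos cs '~' bt)
          (upos cs '`' bk) (upos cs '[' bo) (upos cs ']' bc) := by
  intro fuel
  induction fuel with
  | zero => intro n _ _ _ _ _ _ _ _ _ hf; omega
  | succ fuel ih =>
    intro n bs bu bt bk bo bc hn hf h1 h2 h3 h4 h5 h6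
    simp only [trimA, trimB]
    rw [orphan_take cs n hn]
    by_cases hg : (decide (n > 0) && (cs.getD (n - 1) ' ' == '\\') && !escapedAt cs (n - 1)) = true
    · rw [if_pos hg, if_pos hg]
      have hn0 : 0 < n := by
        rcases Bool.and_eq_true .. |>.mp (Bool.and_eq_true .. |>.mp hg).1 with ⟨hd, -⟩
        exact of_decide_eq_true hd
      have hdl : (cs.take n).dropLast = cs.take (n - 1) := by
        rw [List.dropLast_eq_take, List.take_take, List.length_take_of_le hn]
        congr 1; omega
      rw [hdl]
      exact ih (n - 1) bs bu bt bk bo bc (by omega) (by omega) (by omega) (by omega)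
        (by omega) (by omega) (by omega) (by omega)
    · rw [if_neg hg, if_neg hg]
      rw [dropGE_upos cs '*' n bs h1, dropGE_upos cs '_' n bu h2, dropGE_upos cs '~' n bt h3,
          dropGE_upos cs '`' n bk h4, dropGE_upos cs '[' n bo h5, dropGE_upos cs ']' n bc h6]
      have hlen : (cs.take n).length = n := List.length_take_of_le hn
      simp only [findPos_take, hlen, stepEq, brEq]
      have key : ∀ (q : Int), 0 ≤ q →
          (if ((n : Int) ≤ q) then List.take n cs
            else trimA fuel (List.take q.toNat (List.take n cs)))
          = (if ((n : Int) ≤ q) then List.take n cs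
            else trimB cs fuel q.toNat (upos cs '*' n) (upos cs '_' n)
                (upos cs '~' n) (upos cs '`' n) (upos cs '[' n) (upos cs ']' n)) := by
        intro q hq
        by_cases hfin : (n : Int) ≤ q
        · rw [if_pos hfin, if_pos hfin]
        · rw [if_neg hfin, if_neg hfin, List.take_take,
              show min q.toNat n = q.toNat by omega]
          exact ih q.toNat n n n n n n (by omega) (by omega) (by omega) (by omega) (by omega)
            (by omega) (by omega) (by omega)
      rw [← List.foldl_map (f := fun m => upos cs m n)
            (g := fun cut l => if l.length % 2 == 1 && l.getLastD 0 < cut then l.getLastD 0 else cut)]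
      simp only [pvMarkersA, List.map_cons, List.map_nil]
      apply key
      apply hbr_nonneg
      · exact fun x hx => (upos_nonneg cs '[' n x hx).1
      · apply foldl_stepB_nonneg _ _ (by omega)
        intro L hL
        simp only [List.mem_cons, List.not_mem_nil, or_false] at hL
        apply getLastD_nonneg
        rcases hL with rfl | rfl | rfl | rfl
        · exact fun x hx => (upos_nonneg cs '*' n x hx).1
        · exact fun x hx => (upos_nonneg cs '_' n x hx).1
        · exact fun x hx => (upos_nonneg cs '~' n x hx).1
        · exact fun x hx => (upos_nonneg cs '`' n x hx).1

-- ===== VERDICT (by name: the statement is the Claim_ definition above) =====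
theorem trim_to_markdown_v2_safe_boundary_py_spec : Claim_equal_trim_to_markdown_v2_safe_boundary_py := by
  intro text _
  unfold Spec_trim_to_markdown_v2_safe_boundary_py
  unfold trim_to_markdown_v2_safe_boundary_py trim_to_markdown_v2_safe_boundary_py_alt
  have h := trim_main text.toList (text.toList.length + 1) text.toList.length
    text.toList.length text.toList.length text.toList.length text.toList.length
    text.toList.length text.toList.length
    le_rfl (Nat.lt_succ_self _) le_rfl le_rfl le_rfl le_rfl le_rfl le_rfl
  simp only [List.take_length] at h
  simp only [h, positionsOf_eq]
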